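-- pv_equiv track=rewrite | github.com/Edouard94/Ophiocordyceps-nutans-study | scripts/analysis/qc_alignments.py | per_seq_stats
-- ===== SOURCE A (Python) =====
-- def per_seq_stats(seq: str, cons: str) -> tuple[int, int, int]:
--     """Return (sites_considered, n_count, mismatches).
--     sites_considered = positions where seq has A/C/G/T (ignore gaps and N in seq)
--     n_count = positions where seq has N
--     mismatches = positions where seq is A/C/G/T and differs from consensus A/C/G/T at same site
--     """
--     L = min(len(seq), len(cons))
--     sites = 0
--     ncount = 0
--     mm = 0
--     for i in range(L):
--         q = seq[i].upper()
--         if q == "N":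
--             ncount += 1
--             continue
--         if q not in ("A", "C", "G", "T"):
--             continue  # ignore gaps and others
--         sites += 1
--         c = cons[i].upper() if i < len(cons) else "N"
--         if c in ("A", "C", "G", "T") and q != c:
--             mm += 1
--     return sites, ncount, mm
-- ===== SOURCE B (Python) =====
-- def per_seq_stats(seq: str, cons: str) -> tuple[int, int, int]:
--     """Histogram approach: tally the frequency of each (seq_char, cons_char)
--     pair once, then classify each DISTINCT pair and add its weight."""
--     freq = {}
--     for pair in zip(seq, cons):
--         freq[pair] = freq.get(pair, 0) + 1
--     sites = ncount = mm = 0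
--     for (q0, c0), k in freq.items():
--         q = q0.upper()
--         if q == "N":
--             ncount += k
--         elif q in ("A", "C", "G", "T"):
--             sites += k
--             c = c0.upper()
--             if c in ("A", "C", "G", "T") and q != c:
--                 mm += k
--     return sites, ncount, mm
-- ===== Notes on version B (the rewrite author's own statement) =====
-- stated objective: alternative
-- what changed: Replaced A's per-position stateful scan by a histogram algorithm: build a frequency dictionary of (seq_char, cons_char) pairs in one pass, then classify each DISTINCT pair once and add its count to the three totals.
import Mathlib
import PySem

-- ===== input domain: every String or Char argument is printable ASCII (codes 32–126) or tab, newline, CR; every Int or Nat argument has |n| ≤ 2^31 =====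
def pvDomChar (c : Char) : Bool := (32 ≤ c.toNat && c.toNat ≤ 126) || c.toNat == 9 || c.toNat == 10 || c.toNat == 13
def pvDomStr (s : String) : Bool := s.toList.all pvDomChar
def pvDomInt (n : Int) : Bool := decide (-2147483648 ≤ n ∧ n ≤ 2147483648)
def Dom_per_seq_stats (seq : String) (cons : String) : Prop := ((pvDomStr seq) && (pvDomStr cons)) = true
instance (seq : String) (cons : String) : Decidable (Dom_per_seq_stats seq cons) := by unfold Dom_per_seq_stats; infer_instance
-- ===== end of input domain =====

-- B replaces A's per-position scan by a histogram algorithm: tally a frequency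
-- dictionary of (seq,cons) character pairs, then classify each distinct pair once.

-- ===== PORT A =====
-- literal port of A: one loop over range(L) with three accumulators and early-continue branches
def per_seq_stats (seq : String) (cons : String) : Int × Int × Int :=
  let s := seq.toList
  let cs := cons.toList
  let L := min s.length cs.length
  let st := (List.range L).foldl (fun (acc : Int × Int × Int) i =>
    let q := PySem.Chars.upperChar (s.getD i ' ')   -- seq[i].upper(), i always in range
    if q == 'N' then (acc.1, acc.2.1 + 1, acc.2.2)
    else if !(q == 'A' || q == 'C' || q == 'G' || q == 'T') then acc
    else
      let sites := acc.1 + 1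
      let c := if i < cs.length then PySem.Chars.upperChar (cs.getD i ' ') else 'N'
      if (c == 'A' || c == 'C' || c == 'G' || c == 'T') && q != c then
        (sites, acc.2.1, acc.2.2 + 1)
      else (sites, acc.2.1, acc.2.2)) (0, 0, 0)
  st

-- ===== PORT B =====
-- q in ("A","C","G","T")
def pvIsACGT (c : Char) : Bool := c == 'A' || c == 'C' || c == 'G' || c == 'T'

-- body of B's first loop: freq[pair] = freq.get(pair, 0) + 1
def pvTally (d : PySem.Dict (Char × Char) Int) (p : Char × Char) : PySem.Dict (Char × Char) Int :=
  d.insert p (d.getD p 0 + 1)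

-- body of B's second loop: classify one distinct pair and add its weight k
def pvClassify (acc : Int × Int × Int) (kv : (Char × Char) × Int) : Int × Int × Int :=
  let q := PySem.Chars.upperChar kv.1.1
  if q == 'N' then (acc.1, acc.2.1 + kv.2, acc.2.2)
  else if pvIsACGT q then
    let c := PySem.Chars.upperChar kv.1.2
    if pvIsACGT c && q != c then (acc.1 + kv.2, acc.2.1, acc.2.2 + kv.2)
    else (acc.1 + kv.2, acc.2.1, acc.2.2)
  else acc

-- port of B: build the pair histogram, then aggregate over its items
def per_seq_stats_alt (seq : String) (cons : String) : Int × Int × Int :=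
  let freq := (seq.toList.zip cons.toList).foldl pvTally PySem.Dict.empty
  freq.items.foldl pvClassify (0, 0, 0)

-- ===== PRECONDITION & SPEC =====
def Spec_per_seq_stats (seq : String) (cons : String) (out : Int × Int × Int) : Prop := out = per_seq_stats_alt seq cons
instance (seq : String) (cons : String) (out : Int × Int × Int) : Decidable (Spec_per_seq_stats seq cons out) := by unfold Spec_per_seq_stats; infer_instance

-- ===== CLAIM (what is proved, stated in full; the proofs are below) =====
def Claim_equal_per_seq_stats : Prop := ∀ (seq : String) (cons : String), Dom_per_seq_stats seq cons → Spec_per_seq_stats seq cons (per_seq_stats seq cons)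

-- ===== LEMMAS AND PROOFS =====

-- the three per-pair classification predicates shared by both reductions
def pvW1 (k : Char × Char) : Bool := pvIsACGT (PySem.Chars.upperChar k.1)
def pvW2 (k : Char × Char) : Bool := PySem.Chars.upperChar k.1 == 'N'
def pvW3 (k : Char × Char) : Bool :=
  pvW1 k && pvIsACGT (PySem.Chars.upperChar k.2) && PySem.Chars.upperChar k.1 != PySem.Chars.upperChar k.2

-- A's loop body, read off the i-th pair of characters (pre-uppercase)
def pvStep (acc : Int × Int × Int) (p : Char × Char) : Int × Int × Int :=
  let q := PySem.Chars.upperChar p.1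
  if q == 'N' then (acc.1, acc.2.1 + 1, acc.2.2)
  else if !(pvIsACGT q) then acc
  else
    let sites := acc.1 + 1
    let c := PySem.Chars.upperChar p.2
    if pvIsACGT c && q != c then
      (sites, acc.2.1, acc.2.2 + 1)
    else (sites, acc.2.1, acc.2.2)

lemma pvStep_counts (l : List (Char × Char)) (a b m : Int) :
    l.foldl pvStep (a, b, m) =
      (a + (l.countP pvW1 : Int), b + (l.countP pvW2 : Int), m + (l.countP pvW3 : Int)) := by
  induction l generalizing a b m with
  | nil => simp
  | cons p t ih =>
    have hNA : pvW2 p = true → pvW1 p = false := by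
      simp [pvW1, pvW2, pvIsACGT]; intro h; simp [h]
    simp only [List.foldl_cons, List.countP_cons, pvStep]
    by_cases hN : pvW2 p = true
    · have hq : (PySem.Chars.upperChar p.1 == 'N') = true := hN
      simp only [hq, if_true, ih, hN, hNA hN, pvW3, Bool.false_and]
      simp [Prod.ext_iff]; omega
    · have hq : (PySem.Chars.upperChar p.1 == 'N') = false := by
        simpa [pvW2] using hN
      simp only [hq, Bool.false_eq_true, if_false]
      by_cases hA : pvW1 p = true
      · have hA' : pvIsACGT (PySem.Chars.upperChar p.1) = true := hA
        simp only [hA', Bool.not_true, Bool.false_eq_true, if_false]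
        by_cases hmm : (pvIsACGT (PySem.Chars.upperChar p.2) &&
            PySem.Chars.upperChar p.1 != PySem.Chars.upperChar p.2) = true
        · have h3 : pvW3 p = true := by
            simp only [pvW3, hA, Bool.true_and]; exact hmm
          simp only [hmm, if_true, ih, hA, hN, h3]
          simp [Prod.ext_iff]; omega
        · have h3 : pvW3 p = false := by
            simp only [pvW3, hA, Bool.true_and]; exact (Bool.not_eq_true _).mp hmm
          simp only [hmm, Bool.false_eq_true, if_false, ih, hA, hN, h3]
          simp [Prod.ext_iff]; omega
      · have hA' : pvIsACGT (PySem.Chars.upperChar p.1) = false := by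
          simpa [pvW1] using hA
        have h3 : pvW3 p = false := by simp [pvW3, pvW1, hA']
        simp only [hA', Bool.not_false, if_true, ih, hA, hN, h3, Bool.false_eq_true]
        simp

-- pairing the index range with getD gives the zip of the prefixes
lemma pvRange_pairs (s c : List Char) (L : Nat) (hs : L ≤ s.length) (hc : L ≤ c.length) :
    (List.range L).map (fun i => (s.getD i ' ', c.getD i ' ')) = (s.take L).zip (c.take L) := by
  apply List.ext_getElem
  · simp [List.length_zip, List.length_take]; omega
  · intro i h1 h2
    have hiL : i < L := by simpa using h1
    simp [List.getD_eq_getElem?_getD, List.getElem?_eq_getElem (by omega : i < s.length),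
      List.getElem?_eq_getElem (by omega : i < c.length)]

-- zip already truncates to the shorter list
lemma pvZip_take (s c : List Char) :
    (s.take (min s.length c.length)).zip (c.take (min s.length c.length)) = s.zip c := by
  apply List.ext_getElem
  · simp [List.length_zip, List.length_take]
  · intro i h1 h2
    simp [List.getElem_zip, List.getElem_take]

-- sum of an equality indicator over a Nodup list containing x once
lemma pvSum_single (ks : List (Char × Char)) (x : Char × Char) (v : Int)
    (hnd : ks.Nodup) (hx : x ∈ ks) :
    (ks.map (fun k => if k = x then v else 0)).sum = v := by
  induction ks with
  | nil => cases hx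
  | cons y ys ih =>
    rcases List.nodup_cons.mp hnd with ⟨hy, hnd'⟩
    simp only [List.map_cons, List.sum_cons]
    by_cases h : y = x
    · have hz : (ys.map (fun k => if k = x then v else 0)).sum = 0 := by
        apply List.sum_eq_zero
        intro z hz'
        rcases List.mem_map.mp hz' with ⟨k, hk, rfl⟩
        have hkx : k ≠ x := fun e => hy (by rw [h]; exact e ▸ hk)
        simp [hkx]
      simp [h, hz]
    · have hx' : x ∈ ys := by
        rcases List.mem_cons.mp hx with h' | h'
        · exact absurd h'.symm h
        · exact h'
      rw [ih hnd' hx']; simp [h]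

-- summing a predicate-weighted count over the distinct elements recovers countP
lemma pvSum_count (p : Char × Char → Bool) (ks : List (Char × Char)) (hnd : ks.Nodup) :
    ∀ l : List (Char × Char), (∀ y ∈ l, y ∈ ks) →
      (ks.map (fun k => if p k then (l.count k : Int) else 0)).sum = (l.countP p : Int) := by
  intro l
  induction l with
  | nil => intro _; simp
  | cons x t ih =>
    intro hmem
    have hterm : ∀ k, (if p k then (((x :: t).count k : Nat) : Int) else 0)
        = (if p k then (t.count k : Int) else 0) + (if k = x then (if p x then (1:Int) else 0) else 0) := by
      intro k
      by_cases hk : k = x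
      · subst hk; simp [List.count_cons]
        split_ifs <;> simp
      · have hxk : ¬ x = k := fun e => hk e.symm
        have hc : (x :: t).count k = t.count k := by
          simp [hxk]
        simp [hc, hk]
    calc (ks.map (fun k => if p k then ((x :: t).count k : Int) else 0)).sum
        = (ks.map (fun k => (if p k then (t.count k : Int) else 0)
              + (if k = x then (if p x then (1:Int) else 0) else 0))).sum := by
          congr 1; exact List.map_congr_left (fun k _ => hterm k)
      _ = (ks.map (fun k => if p k then (t.count k : Int) else 0)).sum
            + (ks.map (fun k => if k = x then (if p x then (1:Int) else 0) else 0)).sum := by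
          rw [← List.sum_map_add]
      _ = (t.countP p : Int) + (if p x then (1:Int) else 0) := by
          rw [ih (fun y hy => hmem y (List.mem_cons_of_mem _ hy)),
            pvSum_single ks x _ hnd (hmem x (List.mem_cons_self))]
      _ = ((x :: t).countP p : Int) := by
          rw [List.countP_cons]; split_ifs with h <;> simp

-- B's aggregation loop over an items list, componentwise
lemma pvClassify_fold (its : List ((Char × Char) × Int)) (a b m : Int) :
    its.foldl pvClassify (a, b, m) =
      (a + (its.map (fun kv => if pvW1 kv.1 then kv.2 else 0)).sum,
       b + (its.map (fun kv => if pvW2 kv.1 then kv.2 else 0)).sum,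
       m + (its.map (fun kv => if pvW3 kv.1 then kv.2 else 0)).sum) := by
  induction its generalizing a b m with
  | nil => simp
  | cons kv t ih =>
    simp only [List.foldl_cons, List.map_cons, List.sum_cons, pvClassify]
    by_cases hN : (PySem.Chars.upperChar kv.1.1 == 'N') = true
    · have h1 : pvW1 kv.1 = false := by
        have := (beq_iff_eq.mp hN); simp [pvW1, pvIsACGT, this]
      have h2 : pvW2 kv.1 = true := hN
      have h3 : pvW3 kv.1 = false := by simp [pvW3, h1]
      simp only [hN, if_true, ih, h1, h2, h3, Bool.false_eq_true, if_false]
      simp [Prod.ext_iff]; omega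
    · simp only [hN, Bool.false_eq_true, if_false]
      by_cases hA : pvIsACGT (PySem.Chars.upperChar kv.1.1) = true
      · have h1 : pvW1 kv.1 = true := hA
        have h2 : pvW2 kv.1 = false := by simpa [pvW2] using hN
        simp only [hA, if_true]
        by_cases hmm : (pvIsACGT (PySem.Chars.upperChar kv.1.2) &&
            PySem.Chars.upperChar kv.1.1 != PySem.Chars.upperChar kv.1.2) = true
        · have h3 : pvW3 kv.1 = true := by simp [pvW3, h1, hmm]
          simp only [hmm, if_true, ih, h1, h2, h3, Bool.false_eq_true, if_false]
          simp [Prod.ext_iff]; omega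
        · have h3 : pvW3 kv.1 = false := by
            simp only [pvW3, h1, Bool.true_and]; exact (Bool.not_eq_true _).mp hmm
          simp only [hmm, Bool.false_eq_true, if_false, ih, h1, h2, h3, if_true]
          simp [Prod.ext_iff]; omega
      · have h1 : pvW1 kv.1 = false := by simpa [pvW1] using hA
        have h2 : pvW2 kv.1 = false := by simpa [pvW2] using hN
        have h3 : pvW3 kv.1 = false := by simp [pvW3, h1]
        simp only [hA, Bool.false_eq_true, if_false, ih, h1, h2, h3]
        simp

-- ===== VERDICT (by name: the statement is the Claim_ definition above) =====
theorem per_seq_stats_spec : Claim_equal_per_seq_stats := by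
  intro seq cons _
  unfold Spec_per_seq_stats per_seq_stats per_seq_stats_alt
  simp only []
  set s := seq.toList with hs
  set cs := cons.toList with hcs
  set L := min s.length cs.length with hL
  have hLs : L ≤ s.length := Nat.min_le_left _ _
  have hLc : L ≤ cs.length := Nat.min_le_right _ _
  -- A's loop is pvStep folded over the zipped pairs
  have hfoldA : (List.range L).foldl (fun (acc : Int × Int × Int) i =>
      let q := PySem.Chars.upperChar (s.getD i ' ')
      if q == 'N' then (acc.1, acc.2.1 + 1, acc.2.2)
      else if !(q == 'A' || q == 'C' || q == 'G' || q == 'T') then acc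
      else
        let sites := acc.1 + 1
        let c := if i < cs.length then PySem.Chars.upperChar (cs.getD i ' ') else 'N'
        if (c == 'A' || c == 'C' || c == 'G' || c == 'T') && q != c then
          (sites, acc.2.1, acc.2.2 + 1)
        else (sites, acc.2.1, acc.2.2)) (0, 0, 0)
      = (s.zip cs).foldl pvStep (0, 0, 0) := by
    rw [← pvZip_take s cs, ← pvRange_pairs s cs L hLs hLc, List.foldl_map]
    apply PySem.List.foldl_congr_mem
    intro acc i hi
    have hic : i < cs.length := lt_of_lt_of_le (List.mem_range.mp hi) hLc
    simp [pvStep, pvIsACGT, hic]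
  rw [hfoldA, pvStep_counts]
  -- B's histogram is the counter of the zipped pairs
  have hcounter : (s.zip cs).foldl pvTally PySem.Dict.empty = PySem.Dict.counter (s.zip cs) := by
    unfold pvTally
    exact PySem.Dict.foldl_insert_getD_add_one_eq_counter (s.zip cs)
  rw [hcounter, PySem.Dict.items_counter, pvClassify_fold]
  have hnd : (PySem.Set.ofList (s.zip cs)).Nodup := PySem.Set.nodup_ofList _
  have hmem : ∀ y ∈ s.zip cs, y ∈ PySem.Set.ofList (s.zip cs) :=
    fun y hy => (PySem.Set.mem_ofList _ _).mpr hy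
  have hcomp : ∀ (w : Char × Char → Bool),
      (((PySem.Set.ofList (s.zip cs)).map (fun k => (k, ((s.zip cs).count k : Int)))).map
        (fun kv => if w kv.1 then kv.2 else 0)).sum
      = ((s.zip cs).countP w : Int) := by
    intro w
    rw [List.map_map]
    have := pvSum_count w (PySem.Set.ofList (s.zip cs)) hnd (s.zip cs) hmem
    simpa [Function.comp_def] using this
  rw [hcomp pvW1, hcomp pvW2, hcomp pvW3]
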